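-- pv_equiv track=rewrite | github.com/JoJoTsui/rnadnavar | bin/vcf_utils/unified_filters.py | filter_homopolymer
-- ===== SOURCE A (Python) =====
-- def filter_homopolymer(ref_context, alt, hp_length=6):
--     """Check if the variant is in a homopolymer context"""
--     if len(alt) > 1:
--         alt = alt[1:]
--     elif alt == "-":
--         return False
--     elif ref_context is None:
--         return None
--
--     try:
--         length_to_consider = int((len(ref_context) - 1) / 2)
--     except TypeError:
--         return None
--
--     ref_context = list(ref_context)
--     ref_context[length_to_consider] = alt
--     ref_context = "".join(ref_context)
--     context_to_consider = ref_context[length_to_consider - hp_length + 1 : length_to_consider + hp_length]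
--
--     for idx, base in enumerate(context_to_consider):
--         context_window = context_to_consider[idx : idx + hp_length]
--         if len(context_window) < hp_length:
--             break
--         elif len(set(context_window)) == 1:
--             return True
--     return False
-- ===== SOURCE B (Python) =====
-- def filter_homopolymer(ref_context, alt, hp_length=6):
--     """Check if the variant is in a homopolymer context (maximal-run chunking)"""
--     if len(alt) > 1:
--         alt = alt[1:]
--     elif alt == "-":
--         return False
--     if ref_context is None:
--         return None
--
--     mid = (len(ref_context) - 1) // 2
--     seq = ref_context[:mid] + alt + ref_context[mid + 1:]
--     rest = seq[mid - hp_length + 1 : mid + hp_length]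
--
--     # walk the window run by run: chop off each maximal run of equal bases
--     while rest:
--         k = 1
--         while k < len(rest) and rest[k] == rest[0]:
--             k += 1
--         if k >= hp_length:
--             return True
--         rest = rest[k:]
--     return False
-- ===== Notes on version B (the rewrite author's own statement) =====
-- stated objective: alternative
-- what changed: The nested scan that builds a set of every hp_length-wide sliding window is replaced by chopping the considered context into maximal runs of equal bases and returning True as soon as one run is at least hp_length long; the setup (alt adjustment, middle-base replacement, context slice) is kept. Pre_ excludes the empty-string ref_context (A raises IndexError there unless alt == '-') and negative hp_length, a homopolymer length outside the natural domain, where both programs' negative-slice wraparounds give accidental, differing values.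
-- outside the precondition, e.g. on filter_homopolymer('A', 'AGA-G', -1): A returns False, B returns True; on filter_homopolymer('', 'A', 6): A raises IndexError, B returns False
import Mathlib
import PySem

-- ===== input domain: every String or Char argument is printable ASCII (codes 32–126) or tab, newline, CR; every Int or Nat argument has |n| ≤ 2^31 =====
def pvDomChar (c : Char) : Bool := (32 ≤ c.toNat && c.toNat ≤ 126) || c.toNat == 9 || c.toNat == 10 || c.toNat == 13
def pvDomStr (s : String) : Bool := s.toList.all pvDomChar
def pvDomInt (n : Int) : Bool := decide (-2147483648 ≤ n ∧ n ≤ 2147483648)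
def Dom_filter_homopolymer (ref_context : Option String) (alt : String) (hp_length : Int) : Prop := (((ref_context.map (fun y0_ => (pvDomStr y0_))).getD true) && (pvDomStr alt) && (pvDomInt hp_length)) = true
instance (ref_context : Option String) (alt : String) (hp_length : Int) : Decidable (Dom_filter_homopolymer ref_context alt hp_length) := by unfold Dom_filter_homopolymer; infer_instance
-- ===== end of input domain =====

-- B replaces A's set-per-sliding-window scan by chopping the considered context into maximal
-- runs of equal bases and testing each run's length once; the setup is identical.

-- ===== PORT A =====
-- the for-loop over enumerate(context_to_consider): window slice, break on short window, True on single-element set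
def fhScanA (ctx : List Char) (hp : Int) : List Char → Int → Bool
  | [], _ => false
  | _ :: rest, idx =>
    let window := PySem.List.slice ctx (some idx) (some (idx + hp))
    if (window.length : Int) < hp then false
    else if (PySem.Set.ofList window).length = 1 then true
    else fhScanA ctx hp rest (idx + 1)

-- body after the alt adjustment: try/except TypeError (= ref_context is None), middle-base replacement, slice, scan.
-- pySetD is total where Python's `ref_context[length_to_consider] = alt` raises IndexError (empty string): excluded by Pre_.
def fhBodyA (ref_context : Option String) (altL : List Char) (hp : Int) : Option Bool :=
  match ref_context with
  | none => none
  | some rc =>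
    let rcL := rc.toList
    let L : Int := PySem.Int.truncdiv ((rcL.length : Int) - 1) 2   -- int((len(ref_context) - 1) / 2)
    let s := (PySem.List.pySetD (rcL.map (fun c => [c])) L altL).flatten
    let ctx := PySem.List.slice s (some (L - hp + 1)) (some (L + hp))
    some (fhScanA ctx hp ctx 0)

def filter_homopolymer (ref_context : Option String) (alt : String) (hp_length : Int) : Option Bool :=
  if 1 < alt.toList.length then fhBodyA ref_context (alt.toList.drop 1) hp_length
  else if alt = "-" then some false
  else match ref_context with
  | none => none
  | some _ => fhBodyA ref_context alt.toList hp_length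

-- ===== PORT B =====
-- the `while rest:` loop of Source B: measure the maximal run at the head (the inner `while` =
-- takeWhile), succeed if it reaches hp_length, otherwise continue behind it (rest = rest[k:])
def fhRun (hp : Int) : List Char → Bool
  | [] => false
  | c :: rest =>
    if hp ≤ 1 + ((rest.takeWhile (fun d => d == c)).length : Int) then true
    else fhRun hp (rest.dropWhile (fun d => d == c))
termination_by l => l.length
decreasing_by
  simp only [List.length_cons]
  exact Nat.lt_succ_of_le (List.length_dropWhile_le _ rest)

def fhAfterAlt (ref_context : Option String) (altL : List Char) (hp : Int) : Option Bool :=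
  ref_context.map (fun rc =>
    let mid : Int := PySem.Int.floordiv ((rc.toList.length : Int) - 1) 2
    let seq := PySem.List.slice rc.toList none (some mid) ++ altL ++ PySem.List.slice rc.toList (some (mid + 1)) none
    fhRun hp (PySem.List.slice seq (some (mid - hp + 1)) (some (mid + hp))))

def filter_homopolymer_alt (ref_context : Option String) (alt : String) (hp_length : Int) : Option Bool :=
  if 1 < alt.toList.length then fhAfterAlt ref_context (alt.toList.drop 1) hp_length
  else if alt = "-" then some false
  else fhAfterAlt ref_context alt.toList hp_length

-- ===== PRECONDITION & SPEC =====
-- Pre_ excludes (a) the inputs on which A raises IndexError (ref_context the empty string, unless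
-- alt == "-" which returns False before the indexing), and (b) negative hp_length — a homopolymer
-- length, outside the function's natural domain — where both programs' negative-slice wraparounds
-- give accidental, differing values.
def Pre_filter_homopolymer (ref_context : Option String) (alt : String) (hp_length : Int) : Prop :=
  (ref_context = some "" → alt = "-") ∧ 0 ≤ hp_length
instance (ref_context : Option String) (alt : String) (hp_length : Int) : Decidable (Pre_filter_homopolymer ref_context alt hp_length) := by unfold Pre_filter_homopolymer; infer_instance
def pvWitness_filter_homopolymer : Option String × String × Int := (some "ACAAAAAG", "A", 4)

def Spec_filter_homopolymer (ref_context : Option String) (alt : String) (hp_length : Int) (out : Option Bool) : Prop := out = filter_homopolymer_alt ref_context alt hp_length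
instance (ref_context : Option String) (alt : String) (hp_length : Int) (out : Option Bool) : Decidable (Spec_filter_homopolymer ref_context alt hp_length out) := by unfold Spec_filter_homopolymer; infer_instance

-- ===== CLAIM (what is proved, stated in full; the proofs are below) =====
def Claim_equal_filter_homopolymer : Prop := ∀ (ref_context : Option String) (alt : String) (hp_length : Int), Dom_filter_homopolymer ref_context alt hp_length → Pre_filter_homopolymer ref_context alt hp_length → Spec_filter_homopolymer ref_context alt hp_length (filter_homopolymer ref_context alt hp_length)

-- ===== LEMMAS AND PROOFS =====

-- reference scan over suffixes: window of length k at the head of each suffix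
def winScan (k : Nat) : List Char → Bool
  | [] => false
  | c :: rest =>
    if (c :: rest).length < k then false
    else if (PySem.Set.ofList ((c :: rest).take k)).length = 1 then true
    else winScan k rest

theorem foldl_add_same (c : Char) : ∀ (k : Nat),
    List.foldl PySem.Set.add [c] (List.replicate k c) = [c] := by
  intro k
  induction k with
  | zero => rfl
  | succ k ih => simpa [List.replicate_succ, PySem.Set.add] using ih

theorem ofList_replicate (c : Char) (k : Nat) (hk : 0 < k) :
    PySem.Set.ofList (List.replicate k c) = [c] := by
  obtain ⟨m, rfl⟩ : ∃ m, k = m + 1 := ⟨k - 1, by omega⟩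
  show List.foldl PySem.Set.add PySem.Set.empty (List.replicate (m + 1) c) = [c]
  rw [List.replicate_succ]
  simpa [PySem.Set.add, PySem.Set.empty] using foldl_add_same c m

theorem setlen_ne_one {w : List Char} {c d : Char} (hc : c ∈ w) (hd : d ∈ w) (hne : c ≠ d) :
    (PySem.Set.ofList w).length ≠ 1 := by
  intro h1
  obtain ⟨x, hx⟩ := List.length_eq_one_iff.mp h1
  have hc' : c ∈ PySem.Set.ofList w := (PySem.Set.mem_ofList w c).mpr hc
  have hd' : d ∈ PySem.Set.ofList w := (PySem.Set.mem_ofList w d).mpr hd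
  rw [hx] at hc' hd'
  simp at hc' hd'
  exact hne (hc'.trans hd'.symm)

theorem winScan_cons (k : Nat) (c : Char) (rest : List Char) :
    winScan k (c :: rest) =
      if (c :: rest).length < k then false
      else if (PySem.Set.ofList ((c :: rest).take k)).length = 1 then true
      else winScan k rest := rfl

theorem winScan_short {k : Nat} {l : List Char} (h : l.length < k) : winScan k l = false := by
  cases l with
  | nil => rfl
  | cons c rest => rw [winScan_cons, if_pos h]

theorem mem_take_head (c : Char) (t : List Char) {k : Nat} (h : 0 < k) : c ∈ (c :: t).take k := by
  obtain ⟨m, rfl⟩ : ∃ m, k = m + 1 := ⟨k - 1, by omega⟩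
  simp [List.take_succ_cons]

-- shedding a run of c's shorter than k in front of a different char changes nothing
theorem winScan_shed (k : Nat) (c d : Char) (hne : c ≠ d) :
    ∀ (r : Nat) (rest : List Char), r < k →
      winScan k (List.replicate r c ++ d :: rest) = winScan k (d :: rest) := by
  intro r
  induction r with
  | zero => intro rest _; rfl
  | succ r ih =>
    intro rest hr
    rw [List.replicate_succ, List.cons_append]
    by_cases hlen : (c :: (List.replicate r c ++ d :: rest)).length < k
    · rw [winScan_short hlen, winScan_short (by simp at hlen ⊢; omega)]
    · have hkpos : 0 < k := by omega
      have hcmem : c ∈ (c :: (List.replicate r c ++ d :: rest)).take k :=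
        mem_take_head c _ hkpos
      have hdmem : d ∈ (c :: (List.replicate r c ++ d :: rest)).take k := by
        have hsplit : (c :: (List.replicate r c ++ d :: rest)) = List.replicate (r + 1) c ++ d :: rest := by
          rw [List.replicate_succ, List.cons_append]
        rw [hsplit, List.take_append]
        simp only [List.length_replicate]
        refine List.mem_append_right _ (mem_take_head d rest (by omega))
      rw [winScan_cons, if_neg hlen, if_neg (by simpa using setlen_ne_one hcmem hdmem hne)]
      exact ih rest (by omega)

-- winScan is true as soon as a run of length ≥ k sits at the front
theorem winScan_run_front (k : Nat) (hk : 1 ≤ k) (c : Char) (r : Nat) (hr : k ≤ r)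
    (d : List Char) : winScan k (List.replicate r c ++ d) = true := by
  obtain ⟨m, rfl⟩ : ∃ m, r = m + 1 := ⟨r - 1, by omega⟩
  rw [List.replicate_succ, List.cons_append, winScan_cons]
  rw [if_neg (by simp; omega)]
  have htake : (c :: (List.replicate m c ++ d)).take k = List.replicate k c := by
    have : (c :: (List.replicate m c ++ d)) = List.replicate (m + 1) c ++ d := by
      rw [List.replicate_succ, List.cons_append]
    rw [this, List.take_append, List.length_replicate, List.take_replicate,
      min_eq_left (by omega), show k - (m + 1) = 0 from by omega, List.take_zero,
      List.append_nil]
  rw [htake, if_pos (by rw [ofList_replicate c k (by omega)]; rfl)]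

-- the takeWhile prefix for equality-with-c is a replicate of c
theorem takeWhile_eq_replicate (c : Char) : ∀ (l : List Char),
    l.takeWhile (fun d => d == c) = List.replicate (l.takeWhile (fun d => d == c)).length c := by
  intro l
  induction l with
  | nil => rfl
  | cons e t ih =>
    by_cases he : e = c
    · subst he
      simp only [List.takeWhile_cons, BEq.rfl]
      exact congrArg _ ih
    · simp [he]

-- the head of the dropWhile tail (if any) differs from c
theorem dropWhile_head_ne (c : Char) : ∀ (l : List Char),
    l.dropWhile (fun d => d == c) = [] ∨
    ∃ e t, l.dropWhile (fun d => d == c) = e :: t ∧ e ≠ c := by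
  intro l
  induction l with
  | nil => exact Or.inl rfl
  | cons e t ih =>
    by_cases he : e = c
    · subst he
      simpa [List.dropWhile_cons] using ih
    · exact Or.inr ⟨e, t, by simp [he], he⟩

-- Source B's run-chunking loop equals the reference sliding-window scan
theorem fhRun_eq_winScan_len (k : Nat) (hk : 1 ≤ k) : ∀ (n : Nat) (l : List Char),
    l.length ≤ n → fhRun (k : Int) l = winScan k l := by
  intro n
  induction n with
  | zero =>
    intro l hl
    rw [List.length_eq_zero_iff.mp (by omega : l.length = 0)]
    simp [fhRun, winScan]
  | succ n ih =>
    intro l hlen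
    cases l with
    | nil => simp [fhRun, winScan]
    | cons c rest =>
      set t := rest.takeWhile (fun d => d == c) with ht
      set d := rest.dropWhile (fun d => d == c) with hd
      have hsplit : c :: rest = List.replicate (1 + t.length) c ++ d := by
        have : rest = t ++ d := (List.takeWhile_append_dropWhile).symm
        rw [this, ht]
        conv_lhs => rw [takeWhile_eq_replicate c rest]
        rw [show 1 + t.length = t.length + 1 from by omega, List.replicate_succ,
          List.cons_append, ht]
      rw [show fhRun (k : Int) (c :: rest) =
          (if (k : Int) ≤ 1 + (t.length : Int) then true else fhRun (k : Int) d) from by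
        rw [fhRun]]
      by_cases hkr : (k : Int) ≤ 1 + (t.length : Int)
      · rw [if_pos hkr, hsplit, winScan_run_front k hk c (1 + t.length) (by omega) d]
      · rw [if_neg hkr]
        have hdlen : d.length ≤ n := by
          have := hd ▸ List.length_dropWhile_le (fun d => d == c) rest
          simp only [List.length_cons] at hlen
          omega
        rw [ih d hdlen]
        rcases dropWhile_head_ne c rest with hnil | ⟨e, t', hcons, hne⟩
        · have hdn : d = [] := hd.trans hnil
          rw [hsplit, hdn, List.append_nil,
            winScan_short (show (List.replicate (1 + t.length) c).length < k by
              simp; omega)]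
          rfl
        · have hdc : d = e :: t' := hd.trans hcons
          rw [hsplit, hdc, winScan_shed k c e (fun h => hne h.symm) (1 + t.length) t'
            (by omega)]

theorem scanA_cons (ctx : List Char) (hp : Int) (x : Char) (rest : List Char) (idx : Int) :
    fhScanA ctx hp (x :: rest) idx =
      (if ((PySem.List.slice ctx (some idx) (some (idx + hp))).length : Int) < hp then false
       else if (PySem.Set.ofList (PySem.List.slice ctx (some idx) (some (idx + hp)))).length = 1 then true
       else fhScanA ctx hp rest (idx + 1)) := rfl

theorem scanA_eq_winScan (ctx : List Char) (k : Nat) :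
    ∀ (l : List Char) (i : Nat), l = ctx.drop i → fhScanA ctx (k : Int) l (i : Int) = winScan k l := by
  intro l
  induction l with
  | nil => intro i _; rfl
  | cons x rest ih =>
    intro i hdrop
    have hw : PySem.List.slice ctx (some (i : Int)) (some ((i : Int) + (k : Int))) = (ctx.drop i).take k :=
      PySem.List.slice_natCast_add ctx i k
    rw [scanA_cons, hw, ← hdrop]
    have hlen : ((x :: rest).take k).length = min k (x :: rest).length := by simp
    by_cases hshort : (x :: rest).length < k
    · rw [if_pos (by push_cast [hlen]; omega), winScan_short hshort]
    · rw [if_neg (by push_cast [hlen]; omega), winScan_cons, if_neg hshort]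
      split
      · rfl
      · have hrest : rest = ctx.drop (i + 1) := by
          rw [← List.tail_drop, ← hdrop]
          rfl
        have hcast : (i : Int) + 1 = ((i + 1 : Nat) : Int) := by push_cast; ring
        rw [hcast]
        exact ih (i + 1) hrest

theorem flatten_map_single (l : List Char) : (l.map (fun c => [c])).flatten = l := by
  induction l with
  | nil => rfl
  | cons c t ih => simp [ih]

theorem splice_eq (rcL : List Char) (altL : List Char) (L : Nat) (hL : L < rcL.length) :
    (PySem.List.pySetD (rcL.map (fun c => [c])) (L : Int) altL).flatten
      = rcL.take L ++ altL ++ rcL.drop (L + 1) := by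
  rw [PySem.List.pySetD_natCast]
  rw [List.set_eq_take_cons_drop altL (by simpa using hL)]
  rw [List.flatten_append, List.flatten_cons, ← List.map_take, ← List.map_drop,
    flatten_map_single, flatten_map_single, List.append_assoc]

theorem body_eq (rc : String) (hrc : rc ≠ "") (altL : List Char) (hp : Int) (hhp : 0 ≤ hp) :
    fhBodyA (some rc) altL hp = fhAfterAlt (some rc) altL hp := by
  have hne : rc.toList ≠ [] := fun h => hrc (by
    have := congrArg String.ofList h
    simpa [String.ofList_toList] using this)
  have hn : 1 ≤ rc.toList.length := List.length_pos_iff.mpr hne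
  set n := rc.toList.length with hn_def
  set Lnat : Nat := (n - 1) / 2 with hL_def
  have hcast : (n : Int) - 1 = ((n - 1 : Nat) : Int) := by omega
  have hA : PySem.Int.truncdiv ((n : Int) - 1) 2 = (Lnat : Int) := by
    rw [hcast]
    show Int.tdiv ((n - 1 : Nat) : Int) ((2 : Nat) : Int) = _
    rw [Int.tdiv_eq_ediv_of_nonneg (by positivity)]
    rw [hL_def]
    omega
  have hB : PySem.Int.floordiv ((n : Int) - 1) 2 = (Lnat : Int) := by
    rw [hcast]
    exact_mod_cast PySem.Int.floordiv_natCast (n - 1) 2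
  have hLlt : Lnat < n := by omega
  simp only [fhBodyA, fhAfterAlt, Option.map_some, ← hn_def, hA, hB]
  rw [splice_eq rc.toList altL Lnat hLlt]
  rw [PySem.List.slice_to_natCast]
  have hc1 : (Lnat : Int) + 1 = ((Lnat + 1 : Nat) : Int) := by push_cast; ring
  rw [hc1, PySem.List.slice_from_natCast]
  rcases (by omega : hp = 0 ∨ 1 ≤ hp) with rfl | hhp1
  · have hc2 : (Lnat : Int) - 0 + 1 = ((Lnat + 1 : Nat) : Int) := by push_cast; ring
    have hc3 : (Lnat : Int) + 0 = ((Lnat : Nat) : Int) := by omega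
    rw [hc2, hc3, PySem.List.slice_natCast]
    simp only [show Lnat - (Lnat + 1) = 0 from by omega, List.take_zero]
    simp [fhScanA, fhRun]
  · obtain ⟨k, rfl⟩ : ∃ k : Nat, hp = (k : Int) := ⟨hp.toNat, (Int.toNat_of_nonneg (by omega)).symm⟩
    have hk : 1 ≤ k := by exact_mod_cast hhp1
    rw [fhRun_eq_winScan_len k hk _ _ le_rfl,
      show (0 : Int) = ((0 : Nat) : Int) from by norm_num,
      scanA_eq_winScan _ k _ 0 (by simp)]

-- ===== VERDICT (by name: the statement is the Claim_ definition above) =====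
theorem filter_homopolymer_spec : Claim_equal_filter_homopolymer := by
  intro ref_context alt hp_length _ hpre
  obtain ⟨hpre1, hhp⟩ := hpre
  unfold Spec_filter_homopolymer filter_homopolymer filter_homopolymer_alt
  by_cases h1 : 1 < alt.toList.length
  · rw [if_pos h1, if_pos h1]
    cases ref_context with
    | none => rfl
    | some rc =>
      refine body_eq rc (fun h => ?_) _ _ hhp
      subst h
      have := hpre1 rfl
      subst this
      simp at h1
  · rw [if_neg h1, if_neg h1]
    by_cases h2 : alt = "-"
    · rw [if_pos h2, if_pos h2]
    · rw [if_neg h2, if_neg h2]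
      cases ref_context with
      | none => rfl
      | some rc =>
        exact body_eq rc (fun h => h2 (hpre1 (by rw [h]))) _ _ hhp
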